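-- pv_equiv track=rewrite | github.com/taeminkimdev/saviors-discord-bot | division/util.py | convert_item
-- ===== SOURCE A (Python) =====
-- def convert_item(text):
--     item = ''
--     for c in list(text):
--         if c == '>':
--             item = ''
--
--         elif c != '<':
--             item += c
--
--     return item
-- ===== SOURCE B (Python) =====
-- def convert_item(text):
--     return text.rsplit('>', 1)[-1].replace('<', '')
-- ===== Notes on version B (the rewrite author's own statement) =====
-- stated objective: simpler
-- what changed: Replaces the stateful forward loop that resets on each '>' by a two-step pipeline: rsplit off the suffix after the last '>' and strip '<' with replace (C-level string ops instead of a char-by-char Python loop).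
import Mathlib
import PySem

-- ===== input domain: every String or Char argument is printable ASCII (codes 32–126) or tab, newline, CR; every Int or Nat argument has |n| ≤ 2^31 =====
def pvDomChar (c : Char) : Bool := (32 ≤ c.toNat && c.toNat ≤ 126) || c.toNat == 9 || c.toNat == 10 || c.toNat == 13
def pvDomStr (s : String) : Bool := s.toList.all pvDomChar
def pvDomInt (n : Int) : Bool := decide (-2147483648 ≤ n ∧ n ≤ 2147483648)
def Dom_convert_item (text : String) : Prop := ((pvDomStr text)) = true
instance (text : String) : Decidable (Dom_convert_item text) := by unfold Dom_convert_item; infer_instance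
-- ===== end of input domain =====

-- B replaces A's stateful forward reset-loop by rsplit-after-last-'>' then replace-'<'; return value only.

-- ===== PORT A =====
-- A's loop: item = '' ; reset on '>', append unless '<'
def convert_item (text : String) : String :=
  String.ofList (text.toList.foldl
    (fun item c => if c = '>' then [] else if c ≠ '<' then item ++ [c] else item) [])

-- ===== PORT B =====
-- rsplit('>',1)[-1] = longest suffix containing no '>' (computed by takeWhile on the reverse);
-- .replace('<','') = filter out '<'
def convert_item_alt (text : String) : String :=
  String.ofList (((text.toList.reverse.takeWhile (· ≠ '>')).reverse).filter (· ≠ '<'))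

-- ===== PRECONDITION & SPEC =====
def Spec_convert_item (text : String) (out : String) : Prop := out = convert_item_alt text
instance (text : String) (out : String) : Decidable (Spec_convert_item text out) := by unfold Spec_convert_item; infer_instance

-- ===== CLAIM (what is proved, stated in full; the proofs are below) =====
def Claim_equal_convert_item : Prop := ∀ (text : String), Dom_convert_item text → Spec_convert_item text (convert_item text)

-- ===== LEMMAS AND PROOFS =====

-- B's core on lists: suffix after the last '>', with '<' removed
def pvB (l : List Char) : List Char :=
  ((l.reverse.takeWhile (· ≠ '>')).reverse).filter (· ≠ '<')

theorem tw_self (m : List Char) (h : '>' ∉ m) : m.takeWhile (· ≠ '>') = m := by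
  induction m with
  | nil => rfl
  | cons a m ih =>
    simp only [List.mem_cons, not_or] at h
    simp [List.takeWhile, Ne.symm h.1]
    exact fun x hx h' => h.2 (h' ▸ hx)

theorem tw_app (m : List Char) (c : Char) :
    ((m ++ [c]).takeWhile (· ≠ '>')) =
      if '>' ∈ m then m.takeWhile (· ≠ '>') else m ++ [c].takeWhile (· ≠ '>') := by
  induction m with
  | nil => simp
  | cons a m ih =>
    by_cases ha : a = '>'
    · subst ha; simp [List.takeWhile]
    · simp only [List.cons_append, List.takeWhile_cons, decide_eq_true_eq]
      rw [if_pos ha, if_pos ha, ih]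
      simp [List.mem_cons, Ne.symm ha]
      by_cases hcg : c = '>' <;> simp [List.takeWhile, hcg] <;> split <;> rfl

theorem pvB_cons_mem (c : Char) (l : List Char) (h : '>' ∈ l) : pvB (c :: l) = pvB l := by
  unfold pvB
  rw [List.reverse_cons, tw_app, if_pos (by simpa using h)]

theorem pvB_no_gt (l : List Char) (h : '>' ∉ l) : pvB l = l.filter (· ≠ '<') := by
  unfold pvB
  rw [tw_self _ (by simpa using h), List.reverse_reverse]

theorem main_loop (l : List Char) : ∀ acc : List Char,
    l.foldl (fun item c => if c = '>' then [] else if c ≠ '<' then item ++ [c] else item) acc =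
      if '>' ∈ l then pvB l else acc ++ l.filter (· ≠ '<') := by
  induction l with
  | nil => intro acc; simp
  | cons c l ih =>
    intro acc
    by_cases hc : c = '>'
    · subst hc
      simp only [List.foldl_cons, ih, List.mem_cons, true_or, if_pos]
      by_cases h : '>' ∈ l
      · rw [if_pos h, pvB_cons_mem _ _ h]
      · have hB : pvB ('>' :: l) = l.filter (· ≠ '<') := by
          unfold pvB
          rw [List.reverse_cons, tw_app,
            if_neg (by simp only [List.mem_reverse]; exact h)]
          simp [List.takeWhile]
        rw [if_neg h, hB, List.nil_append]
    · simp only [List.foldl_cons, if_neg hc, ih]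
      have hmem : ('>' ∈ c :: l) ↔ ('>' ∈ l) := by
        simp [List.mem_cons, Ne.symm hc]
      by_cases h : '>' ∈ l
      · rw [if_pos h, if_pos (hmem.mpr h), pvB_cons_mem _ _ h]
      · rw [if_neg h, if_neg (fun hx => h (hmem.mp hx))]
        by_cases hlt : c = '<'
        · subst hlt
          simp
        · simp [hlt]

-- ===== VERDICT (by name: the statement is the Claim_ definition above) =====
theorem convert_item_spec : Claim_equal_convert_item := by
  intro text _
  unfold Spec_convert_item convert_item convert_item_alt
  rw [main_loop]
  by_cases h : '>' ∈ text.toList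
  · rw [if_pos h]; rfl
  · rw [if_neg h, List.nil_append, ← pvB_no_gt _ h]; rfl
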